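-- pv_equiv track=rewrite | github.com/leandro-cine/z-score | diretrizes.py | obter_marcos_vigilancia
-- ===== SOURCE A (Python) =====
-- def obter_marcos_vigilancia(meses):
--     """
--     Função legada: retorna chave da faixa atual e dicionário simples de marcos.
--     """
--     marcos = {
--         "0 a 2 meses": ["Observa um rosto?", "Reage ao som?", "Eleva a cabeça?", "Sorriso social?"],
--         "2 a 4 meses": ["Responde ao contato social?", "Emite sons (oooo/aaaa)?", "Sustenta a cabeça?", "Leva mãos à boca?"],
--         "4 a 6 meses": ["Busca objeto?", "Dá risada?", "Rola?", "Senta com apoio?"],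
--         "6 a 9 meses": ["Localiza o som?", "Duplica sílabas (mamã/babá)?", "Senta sem apoio?", "Transfere objetos?"],
--         "9 a 12 meses": ["Brinca de esconde-achou?", "Imita gestos (tchau)?", "Senta sozinho?", "Pinça completa?"],
--         "12 a 18 meses": ["Anda com ou sem apoio?", "Fala palavras com significado?", "Aponta para pedir?", "Empilha blocos?"],
--         "18 a 24 meses": ["Corre?", "Fala várias palavras?", "Brinca de faz de conta?", "Usa colher com ajuda?"],
--         "2 a 3 anos": ["Forma frases curtas?", "Sobe escadas com ajuda?", "Imita adultos?", "Brinca ao lado de outras crianças?"],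
--         "3 a 5 anos": ["Conta histórias simples?", "Pula?", "Desenha formas simples?", "Brinca cooperativamente?"],
--         "5 a 10 anos": ["Acompanha escola?", "Tem coordenação motora compatível?", "Interage socialmente?", "Realiza autocuidado progressivo?"],
--     }
--
--     faixas = list(marcos.keys())
--     limites = [2, 4, 6, 9, 12, 18, 24, 36, 60, 120]
--     chave = faixas[-1]
--     for faixa, limite in zip(faixas, limites):
--         if meses <= limite:
--             chave = faixa
--             break
--     return chave, marcos
-- ===== SOURCE B (Python) =====
-- def _bisect_left(a, x):
--     lo, hi = 0, len(a)
--     while lo < hi: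
--         mid = (lo + hi) // 2
--         if a[mid] < x:
--             lo = mid + 1
--         else:
--             hi = mid
--     return lo
--
-- def obter_marcos_vigilancia(meses):
--     marcos = {
--         "0 a 2 meses": ["Observa um rosto?", "Reage ao som?", "Eleva a cabeça?", "Sorriso social?"],
--         "2 a 4 meses": ["Responde ao contato social?", "Emite sons (oooo/aaaa)?", "Sustenta a cabeça?", "Leva mãos à boca?"],
--         "4 a 6 meses": ["Busca objeto?", "Dá risada?", "Rola?", "Senta com apoio?"],
--         "6 a 9 meses": ["Localiza o som?", "Duplica sílabas (mamã/babá)?", "Senta sem apoio?", "Transfere objetos?"],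
--         "9 a 12 meses": ["Brinca de esconde-achou?", "Imita gestos (tchau)?", "Senta sozinho?", "Pinça completa?"],
--         "12 a 18 meses": ["Anda com ou sem apoio?", "Fala palavras com significado?", "Aponta para pedir?", "Empilha blocos?"],
--         "18 a 24 meses": ["Corre?", "Fala várias palavras?", "Brinca de faz de conta?", "Usa colher com ajuda?"],
--         "2 a 3 anos": ["Forma frases curtas?", "Sobe escadas com ajuda?", "Imita adultos?", "Brinca ao lado de outras crianças?"],
--         "3 a 5 anos": ["Conta histórias simples?", "Pula?", "Desenha formas simples?", "Brinca cooperativamente?"],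
--         "5 a 10 anos": ["Acompanha escola?", "Tem coordenação motora compatível?", "Interage socialmente?", "Realiza autocuidado progressivo?"],
--     }
--     faixas = list(marcos.keys())
--     limites = [2, 4, 6, 9, 12, 18, 24, 36, 60, 120]
--     idx = min(_bisect_left(limites, meses), len(faixas) - 1)
--     return faixas[idx], marcos
-- ===== Notes on version B (the rewrite author's own statement) =====
-- stated objective: alternative
-- what changed: Replaces the linear zip(faixas,limites) scan with break by a hand-written bisect_left binary search over the sorted thresholds, clamped to the last bracket index.
import Mathlib
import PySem

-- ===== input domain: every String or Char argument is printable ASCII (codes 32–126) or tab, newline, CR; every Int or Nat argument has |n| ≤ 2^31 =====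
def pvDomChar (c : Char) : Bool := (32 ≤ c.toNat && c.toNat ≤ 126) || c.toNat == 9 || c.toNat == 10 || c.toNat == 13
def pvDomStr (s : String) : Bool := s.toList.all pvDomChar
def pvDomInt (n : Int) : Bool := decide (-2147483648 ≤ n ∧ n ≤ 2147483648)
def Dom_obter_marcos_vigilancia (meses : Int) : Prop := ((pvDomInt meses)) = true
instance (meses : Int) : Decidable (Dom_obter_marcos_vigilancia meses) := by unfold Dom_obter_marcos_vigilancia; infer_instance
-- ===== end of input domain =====

-- B replaces A's linear scan over zip(faixas, limites) by a hand-written bisect_left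
-- binary search over the sorted thresholds, clamped to the last bracket (alternative).


-- the shared literal table (the dict 'marcos' as an insertion-ordered association list)
def pvMarcos : List (String × List String) :=
  [ ("0 a 2 meses", ["Observa um rosto?", "Reage ao som?", "Eleva a cabeça?", "Sorriso social?"]),
    ("2 a 4 meses", ["Responde ao contato social?", "Emite sons (oooo/aaaa)?", "Sustenta a cabeça?", "Leva mãos à boca?"]),
    ("4 a 6 meses", ["Busca objeto?", "Dá risada?", "Rola?", "Senta com apoio?"]),
    ("6 a 9 meses", ["Localiza o som?", "Duplica sílabas (mamã/babá)?", "Senta sem apoio?", "Transfere objetos?"]),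
    ("9 a 12 meses", ["Brinca de esconde-achou?", "Imita gestos (tchau)?", "Senta sozinho?", "Pinça completa?"]),
    ("12 a 18 meses", ["Anda com ou sem apoio?", "Fala palavras com significado?", "Aponta para pedir?", "Empilha blocos?"]),
    ("18 a 24 meses", ["Corre?", "Fala várias palavras?", "Brinca de faz de conta?", "Usa colher com ajuda?"]),
    ("2 a 3 anos", ["Forma frases curtas?", "Sobe escadas com ajuda?", "Imita adultos?", "Brinca ao lado de outras crianças?"]),
    ("3 a 5 anos", ["Conta histórias simples?", "Pula?", "Desenha formas simples?", "Brinca cooperativamente?"]),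
    ("5 a 10 anos", ["Acompanha escola?", "Tem coordenação motora compatível?", "Interage socialmente?", "Realiza autocuidado progressivo?"]) ]

-- ===== PORT A =====
-- the for-loop over zip(faixas, limites) with break: returns faixa at the first limite
-- with meses ≤ limite, else the initial chave
def pvLoopA (meses : Int) : List (String × Int) → String → String
  | [], chave => chave
  | (faixa, limite) :: rest, chave =>
      if meses ≤ limite then faixa else pvLoopA meses rest chave

def obter_marcos_vigilancia (meses : Int) : String × (List (String × List String)) :=
  let marcos := pvMarcos
  let faixas := marcos.map Prod.fst
  let limites : List Int := [2, 4, 6, 9, 12, 18, 24, 36, 60, 120]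
  -- faixas[-1]: faixas is a nonempty literal, so the .getD "" default is never used (exact)
  let chave := (PySem.List.pyGet? faixas (-1)).getD ""
  (pvLoopA meses (faixas.zip limites) chave, marcos)

-- ===== PORT B =====
-- _bisect_left's while-loop; lo/hi stay in range, so a[mid] is in range and getD 0 is exact
def pvBisectLeft (a : List Int) (x : Int) (lo hi : Nat) : Nat :=
  if _h : lo < hi then
    let mid := (lo + hi) / 2
    if a.getD mid 0 < x then pvBisectLeft a x (mid + 1) hi else pvBisectLeft a x lo mid
  else lo
termination_by hi - lo
decreasing_by all_goals omega

def obter_marcos_vigilancia_alt (meses : Int) : String × (List (String × List String)) :=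
  let marcos := pvMarcos
  let faixas := marcos.map Prod.fst
  let limites : List Int := [2, 4, 6, 9, 12, 18, 24, 36, 60, 120]
  let idx := min (pvBisectLeft limites meses 0 limites.length) (faixas.length - 1)
  -- faixas[idx]: idx is clamped below len(faixas), so the .getD "" default is never used (exact)
  ((PySem.List.pyGet? faixas (Int.ofNat idx)).getD "", marcos)

-- ===== PRECONDITION & SPEC =====
def Spec_obter_marcos_vigilancia (meses : Int) (out : String × (List (String × List String))) : Prop := out = obter_marcos_vigilancia_alt meses
instance (meses : Int) (out : String × (List (String × List String))) : Decidable (Spec_obter_marcos_vigilancia meses out) := by unfold Spec_obter_marcos_vigilancia; infer_instance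

-- ===== CLAIM (what is proved, stated in full; the proofs are below) =====
def Claim_equal_obter_marcos_vigilancia : Prop := ∀ (meses : Int), Dom_obter_marcos_vigilancia meses → Spec_obter_marcos_vigilancia meses (obter_marcos_vigilancia meses)

-- ===== LEMMAS AND PROOFS =====

-- ===== VERDICT (by name: the statement is the Claim_ definition above) =====
theorem obter_marcos_vigilancia_spec : Claim_equal_obter_marcos_vigilancia := by
  intro meses _
  unfold Spec_obter_marcos_vigilancia obter_marcos_vigilancia obter_marcos_vigilancia_alt
  by_cases h1 : meses ≤ 2
  · simp [pvLoopA, pvBisectLeft, pvMarcos, PySem.List.pyGet?, PySem.List.pyIdx?, h1, show ¬(2:Int) < meses by omega, show ¬(4:Int) < meses by omega, show ¬(6:Int) < meses by omega, show ¬(9:Int) < meses by omega, show ¬(12:Int) < meses by omega, show ¬(18:Int) < meses by omega, show ¬(24:Int) < meses by omega, show ¬(36:Int) < meses by omega, show ¬(60:Int) < meses by omega, show ¬(120:Int) < meses by omega]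
  · by_cases h2 : meses ≤ 4
    · simp [pvLoopA, pvBisectLeft, pvMarcos, PySem.List.pyGet?, PySem.List.pyIdx?, h1, h2, show (2:Int) < meses by omega, show ¬(4:Int) < meses by omega, show ¬(6:Int) < meses by omega, show ¬(9:Int) < meses by omega, show ¬(12:Int) < meses by omega, show ¬(18:Int) < meses by omega, show ¬(24:Int) < meses by omega, show ¬(36:Int) < meses by omega, show ¬(60:Int) < meses by omega, show ¬(120:Int) < meses by omega]
    · by_cases h3 : meses ≤ 6
      · simp [pvLoopA, pvBisectLeft, pvMarcos, PySem.List.pyGet?, PySem.List.pyIdx?, h1, h2, h3, show (2:Int) < meses by omega, show (4:Int) < meses by omega, show ¬(6:Int) < meses by omega, show ¬(9:Int) < meses by omega, show ¬(12:Int) < meses by omega, show ¬(18:Int) < meses by omega, show ¬(24:Int) < meses by omega, show ¬(36:Int) < meses by omega, show ¬(60:Int) < meses by omega, show ¬(120:Int) < meses by omega]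
      · by_cases h4 : meses ≤ 9
        · simp [pvLoopA, pvBisectLeft, pvMarcos, PySem.List.pyGet?, PySem.List.pyIdx?, h1, h2, h3, h4, show (2:Int) < meses by omega, show (4:Int) < meses by omega, show (6:Int) < meses by omega, show ¬(9:Int) < meses by omega, show ¬(12:Int) < meses by omega, show ¬(18:Int) < meses by omega, show ¬(24:Int) < meses by omega, show ¬(36:Int) < meses by omega, show ¬(60:Int) < meses by omega, show ¬(120:Int) < meses by omega]
        · by_cases h5 : meses ≤ 12
          · simp [pvLoopA, pvBisectLeft, pvMarcos, PySem.List.pyGet?, PySem.List.pyIdx?, h1, h2, h3, h4, h5, show (2:Int) < meses by omega, show (4:Int) < meses by omega, show (6:Int) < meses by omega, show (9:Int) < meses by omega, show ¬(12:Int) < meses by omega, show ¬(18:Int) < meses by omega, show ¬(24:Int) < meses by omega, show ¬(36:Int) < meses by omega, show ¬(60:Int) < meses by omega, show ¬(120:Int) < meses by omega]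
          · by_cases h6 : meses ≤ 18
            · simp [pvLoopA, pvBisectLeft, pvMarcos, PySem.List.pyGet?, PySem.List.pyIdx?, h1, h2, h3, h4, h5, h6, show (2:Int) < meses by omega, show (4:Int) < meses by omega, show (6:Int) < meses by omega, show (9:Int) < meses by omega, show (12:Int) < meses by omega, show ¬(18:Int) < meses by omega, show ¬(24:Int) < meses by omega, show ¬(36:Int) < meses by omega, show ¬(60:Int) < meses by omega, show ¬(120:Int) < meses by omega]
            · by_cases h7 : meses ≤ 24
              · simp [pvLoopA, pvBisectLeft, pvMarcos, PySem.List.pyGet?, PySem.List.pyIdx?, h1, h2, h3, h4, h5, h6, h7, show (2:Int) < meses by omega, show (4:Int) < meses by omega, show (6:Int) < meses by omega, show (9:Int) < meses by omega, show (12:Int) < meses by omega, show (18:Int) < meses by omega, show ¬(24:Int) < meses by omega, show ¬(36:Int) < meses by omega, show ¬(60:Int) < meses by omega, show ¬(120:Int) < meses by omega]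
              · by_cases h8 : meses ≤ 36
                · simp [pvLoopA, pvBisectLeft, pvMarcos, PySem.List.pyGet?, PySem.List.pyIdx?, h1, h2, h3, h4, h5, h6, h7, h8, show (2:Int) < meses by omega, show (4:Int) < meses by omega, show (6:Int) < meses by omega, show (9:Int) < meses by omega, show (12:Int) < meses by omega, show (18:Int) < meses by omega, show (24:Int) < meses by omega, show ¬(36:Int) < meses by omega, show ¬(60:Int) < meses by omega, show ¬(120:Int) < meses by omega]
                · by_cases h9 : meses ≤ 60
                  · simp [pvLoopA, pvBisectLeft, pvMarcos, PySem.List.pyGet?, PySem.List.pyIdx?, h1, h2, h3, h4, h5, h6, h7, h8, h9, show (2:Int) < meses by omega, show (4:Int) < meses by omega, show (6:Int) < meses by omega, show (9:Int) < meses by omega, show (12:Int) < meses by omega, show (18:Int) < meses by omega, show (24:Int) < meses by omega, show (36:Int) < meses by omega, show ¬(60:Int) < meses by omega, show ¬(120:Int) < meses by omega]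
                  · by_cases h10 : meses ≤ 120
                    · simp [pvLoopA, pvBisectLeft, pvMarcos, PySem.List.pyGet?, PySem.List.pyIdx?, h1, h2, h3, h4, h5, h6, h7, h8, h9, h10, show (2:Int) < meses by omega, show (4:Int) < meses by omega, show (6:Int) < meses by omega, show (9:Int) < meses by omega, show (12:Int) < meses by omega, show (18:Int) < meses by omega, show (24:Int) < meses by omega, show (36:Int) < meses by omega, show (60:Int) < meses by omega, show ¬(120:Int) < meses by omega]
                    · simp [pvLoopA, pvBisectLeft, pvMarcos, PySem.List.pyGet?, PySem.List.pyIdx?, h1, h2, h3, h4, h5, h6, h7, h8, h9, h10, show (2:Int) < meses by omega, show (4:Int) < meses by omega, show (6:Int) < meses by omega, show (9:Int) < meses by omega, show (12:Int) < meses by omega, show (18:Int) < meses by omega, show (24:Int) < meses by omega, show (36:Int) < meses by omega, show (60:Int) < meses by omega, show (120:Int) < meses by omega]
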